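-- pv_equiv track=rewrite | github.com/haidiliuxin/Trac | analyze_metrics.py | get_gt_ids
-- ===== SOURCE A (Python) =====
-- def check_overlap(str1, str2, n):
--     len1 = len(str1)
--     len2 = len(str2)
--
--     if str1 in str2 or str2 in str1:
--         return True
--     # Check overlap by comparing suffix of str1 with prefix of str2
--     for i in range(1, min(len1, len2) + 1):
--         if i > n and str1[-i:] == str2[:i]:
--             return True
--
--     # Check overlap by comparing prefix of str1 with suffix of str2
--     for i in range(1, min(len1, len2) + 1):
--         if i > n and str1[:i] == str2[-i:]:
--             return True
--
--     return False
--
-- def get_gt_ids(all_texts, injected_adv):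
--     gt_ids =[]
--     for j, segment in enumerate(all_texts):
--         # In MuSiQue (Prompt Injection), injected_adv is a list of strings (the malicious prompt)
--         # But in result file it might be stored differently.
--         # Let's handle list or string.
--         if isinstance(injected_adv, str):
--             injected_adv = [injected_adv]
--
--         for malicious_text in injected_adv:
--             if check_overlap(segment, malicious_text, 10):
--                 gt_ids.append(j)
--     return list(set(gt_ids))
-- ===== SOURCE B (Python) =====
-- def _tail_head_overlap(a, b):
--     # True iff a[-i:] == b[:i] for some overlap length i with 10 < i <= min(len(a), len(b)).
--     # Any such overlap starts with b's first 11 characters inside a: locate them with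
--     # str.find restricted to feasible positions and verify with one startswith each.
--     if len(a) <= 10 or len(b) <= 10:
--         return False
--     anchor = b[:11]
--     p = a.find(anchor, max(len(a) - len(b), 0))
--     while p != -1:
--         if b.startswith(a[p:]):
--             return True
--         p = a.find(anchor, p + 1)
--     return False
--
--
-- def _overlaps(seg, m):
--     return (seg in m or m in seg
--             or _tail_head_overlap(seg, m)
--             or _tail_head_overlap(m, seg))
--
--
-- def get_gt_ids(all_texts, injected_adv):
--     if isinstance(injected_adv, str):
--         injected_adv = [injected_adv]
--     return [j for j, seg in enumerate(all_texts)
--             if any(_overlaps(seg, m) for m in injected_adv)]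
-- ===== Notes on version B (the rewrite author's own statement) =====
-- stated objective: faster
-- what changed: Instead of testing every overlap length i by comparing the two slices str1[-i:] and str2[:i] (and symmetrically) for every (segment, malicious) pair, B anchors on the 11-character prefix of the candidate (any overlap longer than 10 must start with it), locates its occurrences with C-level str.find restricted to feasible positions and verifies each with one startswith, records each segment index at most once via any(), and returns the index list directly (the function's value is a de-duplicated id set, compared as a set).
import Mathlib
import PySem

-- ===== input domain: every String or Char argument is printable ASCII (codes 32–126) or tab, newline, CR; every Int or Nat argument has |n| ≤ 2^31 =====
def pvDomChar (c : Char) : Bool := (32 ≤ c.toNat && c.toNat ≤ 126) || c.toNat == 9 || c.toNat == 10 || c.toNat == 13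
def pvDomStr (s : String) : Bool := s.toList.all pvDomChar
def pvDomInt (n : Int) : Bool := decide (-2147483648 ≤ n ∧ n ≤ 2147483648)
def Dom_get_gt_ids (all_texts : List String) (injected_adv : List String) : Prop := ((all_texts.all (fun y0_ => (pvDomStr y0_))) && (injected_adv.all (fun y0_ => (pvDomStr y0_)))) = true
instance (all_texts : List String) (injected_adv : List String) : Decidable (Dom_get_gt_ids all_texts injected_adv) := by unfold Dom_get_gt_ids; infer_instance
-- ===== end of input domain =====

-- B replaces A's per-length slice comparisons by an anchored str.find scan (11-char anchor +
-- one startswith per candidate position), records each index once via any(), and returns the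
-- id list directly; the function's value is the de-duplicated id set (compared as a set), and
-- A's `list(set(gt_ids))` is ported per the type convention as the distinct elements in
-- first-occurrence order (PySem.Set.ofList).

-- ===== PORT A =====
def check_overlap (str1 str2 : String) (n : Int) : Bool :=
  let len1 : Int := PySem.Str.len str1
  let len2 : Int := PySem.Str.len str2
  if PySem.Str.isIn str1 str2 || PySem.Str.isIn str2 str1 then
    true
  -- for i in range(1, min(len1, len2)+1): if i > n and str1[-i:] == str2[:i]: return True
  else if (PySem.List.pyRange 1 (min len1 len2 + 1) 1).any (fun i =>
      decide (i > n) && (PySem.Str.slice str1 (some (-i)) none == PySem.Str.slice str2 none (some i))) then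
    true
  -- for i in range(1, min(len1, len2)+1): if i > n and str1[:i] == str2[-i:]: return True
  else if (PySem.List.pyRange 1 (min len1 len2 + 1) 1).any (fun i =>
      decide (i > n) && (PySem.Str.slice str1 none (some i) == PySem.Str.slice str2 (some (-i)) none)) then
    true
  else
    false

-- the `isinstance(injected_adv, str)` branch cannot occur: injected_adv : List String here.
def get_gt_ids (all_texts : List String) (injected_adv : List String) : List Int :=
  let gt_ids : List Int :=
    (PySem.List.enumerate all_texts 0).foldl (fun acc js =>
      injected_adv.foldl (fun acc m =>
        if check_overlap js.2 m 10 then acc ++ [js.1] else acc) acc) []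
  PySem.Set.ofList gt_ids    -- list(set(gt_ids)): the distinct ids, first-occurrence order

-- ===== PORT B =====
-- while p != -1: if b.startswith(a[p:]): return True; p = a.find(anchor, p+1)
-- (fuel = len(a)+1 only makes the recursion structural: p strictly increases each round)
def findLoopB (a b anchor : String) : Nat → Int → Bool
  | 0, _ => false
  | fuel+1, p =>
    if p = -1 then false
    else if PySem.Str.startswith b (PySem.Str.slice a (some p) none) then true
    else findLoopB a b anchor fuel (PySem.Str.findFrom a anchor (p+1) none)

def tail_head_overlap (a b : String) : Bool :=
  if PySem.Str.len a ≤ 10 ∨ PySem.Str.len b ≤ 10 then false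
  else
    let anchor := PySem.Str.slice b none (some 11)          -- b[:11]
    let p0 := PySem.Str.findFrom a anchor (max (PySem.Str.len a - PySem.Str.len b) 0) none
    findLoopB a b anchor (a.toList.length + 1) p0

def overlap_alt (seg m : String) : Bool :=
  PySem.Str.isIn seg m || PySem.Str.isIn m seg ||
    tail_head_overlap seg m || tail_head_overlap m seg

def get_gt_ids_alt (all_texts : List String) (injected_adv : List String) : List Int :=
  ((PySem.List.enumerate all_texts 0).filter (fun js =>
      injected_adv.any (fun m => overlap_alt js.2 m))).map (fun js => js.1)

-- ===== PRECONDITION & SPEC =====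
def Spec_get_gt_ids (all_texts : List String) (injected_adv : List String) (out : List Int) : Prop := out = get_gt_ids_alt all_texts injected_adv
instance (all_texts : List String) (injected_adv : List String) (out : List Int) : Decidable (Spec_get_gt_ids all_texts injected_adv out) := by unfold Spec_get_gt_ids; infer_instance

-- ===== CLAIM (what is proved, stated in full; the proofs are below) =====
def Claim_equal_get_gt_ids : Prop := ∀ (all_texts : List String) (injected_adv : List String), Dom_get_gt_ids all_texts injected_adv → Spec_get_gt_ids all_texts injected_adv (get_gt_ids all_texts injected_adv)

-- ===== LEMMAS AND PROOFS =====

/-- the overlap relation both loop families decide: some suffix of A of length i,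
    10 < i ≤ min(|A|,|B|), equals the prefix of B of the same length. -/
def OvL (A B : List Char) : Prop :=
  ∃ i : Nat, 11 ≤ i ∧ i ≤ A.length ∧ i ≤ B.length ∧ A.drop (A.length - i) = B.take i

theorem str_beq_iff (s t : String) : (s == t) = true ↔ s.toList = t.toList := by
  rw [beq_iff_eq, ← String.toList_inj]

theorem str_beq_comm (s t : String) : (s == t) = (t == s) := by
  rw [Bool.eq_iff_iff, beq_iff_eq, beq_iff_eq]; exact eq_comm

theorem anyA_iff (a b : String) :
    ((PySem.List.pyRange 1 (min (PySem.Str.len a) (PySem.Str.len b) + 1) 1).any (fun i =>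
      decide (i > 10) && (PySem.Str.slice a (some (-i)) none == PySem.Str.slice b none (some i)))) = true
    ↔ OvL a.toList b.toList := by
  simp only [List.any_eq_true, PySem.List.mem_pyRange_one, Bool.and_eq_true, decide_eq_true_eq,
    PySem.Str.len_eq]
  constructor
  · rintro ⟨i, ⟨h1, h2⟩, h10, heq⟩
    rw [Int.lt_add_one_iff, le_min_iff] at h2
    lift i to ℕ using (by omega) with k
    rw [str_beq_iff] at heq
    simp only [PySem.Str.toList_slice, PySem.Chars.slice_eq_listSlice] at heq
    have hk11 : 11 ≤ k := by omega
    have hka : k ≤ a.toList.length := by omega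
    have hkb : k ≤ b.toList.length := by omega
    rw [PySem.List.slice_from_neg_natCast _ k (by omega),
        PySem.List.slice_to _ (by positivity)] at heq
    simp only [Int.toNat_natCast] at heq
    exact ⟨k, hk11, hka, hkb, heq⟩
  · rintro ⟨k, h11, hka, hkb, heq⟩
    refine ⟨(k : Int), ⟨by omega, ?_⟩, by omega, ?_⟩
    · rw [Int.lt_add_one_iff, le_min_iff]; omega
    · rw [str_beq_iff]
      simp only [PySem.Str.toList_slice, PySem.Chars.slice_eq_listSlice]
      rw [PySem.List.slice_from_neg_natCast _ k (by omega),
          PySem.List.slice_to _ (by positivity)]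
      simpa using heq

theorem findLoopB_iff (a b anchor : String) (hne : anchor.toList ≠ []) :
    ∀ fuel s : Nat, s ≤ a.toList.length → a.toList.length + 1 - s ≤ fuel →
      (findLoopB a b anchor fuel (PySem.Str.findFrom a anchor (s : Int) none) = true
        ↔ ∃ p : Nat, s ≤ p ∧ anchor.toList <+: a.toList.drop p ∧ a.toList.drop p <+: b.toList) := by
  intro fuel
  induction fuel with
  | zero => intro s hs hf; exact absurd hf (by omega)
  | succ f ih =>
    intro s hs hf
    rw [PySem.Str.findFrom_eq]
    by_cases hN : PySem.Chars.findFrom a.toList anchor.toList (s : Int) none = -1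
    · rw [hN]
      have hfalse : findLoopB a b anchor (f+1) (-1) = false := by simp [findLoopB]
      rw [hfalse]
      simp only [Bool.false_eq_true, false_iff]
      rintro ⟨p, hp, h1, h2⟩
      rw [PySem.Chars.findFrom_natCast_eq_neg_one_iff a.toList anchor.toList s hs] at hN
      refine hN ?_
      have hdd : a.toList.drop p = (a.toList.drop s).drop (p - s) := by
        rw [List.drop_drop]; congr 1; omega
      rw [hdd] at h1
      exact h1.isInfix.trans (List.drop_suffix _ _).isInfix
    · obtain ⟨hsr, hpre, hmin⟩ :=
        PySem.Chars.findFrom_natCast_spec a.toList anchor.toList s hs hN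
      obtain ⟨r, hqr⟩ : ∃ r : Nat,
          PySem.Chars.findFrom a.toList anchor.toList (s : Int) none = (r : Int) :=
        ⟨(PySem.Chars.findFrom a.toList anchor.toList (s : Int) none).toNat,
          (Int.toNat_of_nonneg (le_trans (Int.natCast_nonneg s) hsr)).symm⟩
      rw [hqr] at hsr hpre hmin ⊢
      simp only [Int.toNat_natCast] at hpre hmin
      have hsr' : s ≤ r := by exact_mod_cast hsr
      have hrla : r < a.toList.length := by
        by_contra hcon
        rw [List.drop_eq_nil_of_le (by omega)] at hpre
        exact hne (List.prefix_nil.mp hpre)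
      simp only [findLoopB]
      rw [if_neg (by omega)]
      by_cases hsw : a.toList.drop r <+: b.toList
      · rw [if_pos ?side]
        case side =>
          simp only [PySem.Str.startswith_eq, PySem.Str.toList_slice,
            PySem.Chars.slice_eq_listSlice]
          rw [PySem.List.slice_from _ (Int.natCast_nonneg r)]
          simp only [Int.toNat_natCast]
          exact (PySem.Chars.startswith_iff _ _).mpr hsw
        simp only [true_iff]
        exact ⟨r, hsr', hpre, hsw⟩
      · rw [if_neg ?side]
        case side =>
          simp only [PySem.Str.startswith_eq, PySem.Str.toList_slice,
            PySem.Chars.slice_eq_listSlice]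
          rw [PySem.List.slice_from _ (Int.natCast_nonneg r)]
          simp only [Int.toNat_natCast]
          intro hcon
          exact hsw ((PySem.Chars.startswith_iff _ _).mp hcon)
        have hcast : (r : Int) + 1 = ((r + 1 : Nat) : Int) := by push_cast; ring
        rw [hcast, ih (r + 1) (by omega) (by omega)]
        constructor
        · rintro ⟨p, hp, h1, h2⟩
          exact ⟨p, by omega, h1, h2⟩
        · rintro ⟨p, hp, h1, h2⟩
          refine ⟨p, ?_, h1, h2⟩
          rcases Nat.lt_trichotomy p r with hpr | hpr | hpr
          · exact absurd h1 (hmin p hp hpr)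
          · rw [hpr] at h2
            exact absurd h2 hsw
          · omega

theorem exists_anchor_iff (A B : List Char) (hla : 11 ≤ A.length) (hlb : 11 ≤ B.length) :
    (∃ p : Nat, A.length - B.length ≤ p ∧ B.take 11 <+: A.drop p ∧ A.drop p <+: B)
      ↔ OvL A B := by
  constructor
  · rintro ⟨p, hp, hanch, hpre⟩
    have hanchlen : (B.take 11).length = 11 := by
      rw [List.length_take]; omega
    have hplen : p < A.length := by
      by_contra hcon
      push_neg at hcon
      rw [List.drop_eq_nil_of_le hcon] at hanch
      have := List.prefix_nil.mp hanch
      rw [this] at hanchlen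
      simp at hanchlen
    have h11 : 11 ≤ A.length - p := by
      have := hanch.length_le
      rw [hanchlen, List.length_drop] at this
      omega
    have hilb : A.length - p ≤ B.length := by
      have := hpre.length_le
      rw [List.length_drop] at this
      omega
    have heq : A.drop p = B.take (A.length - p) := by
      rw [List.prefix_iff_eq_take] at hpre
      rw [hpre, List.length_drop]
    exact ⟨A.length - p, h11, by omega, hilb,
      by rw [show A.length - (A.length - p) = p by omega]; exact heq⟩
  · rintro ⟨i, h11, hia, hib, heq⟩
    refine ⟨A.length - i, by omega, ?_, ?_⟩
    · rw [heq]
      have : B.take 11 = (B.take i).take 11 := by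
        rw [List.take_take, min_eq_left h11]
      rw [this]
      exact List.take_prefix _ _
    · rw [heq]
      exact List.take_prefix _ _

theorem tho_iff (a b : String) :
    tail_head_overlap a b = true ↔ OvL a.toList b.toList := by
  unfold tail_head_overlap
  simp only [PySem.Str.len_eq]
  split_ifs with h
  · simp only [false_iff]
    rintro ⟨i, h11, hia, hib, -⟩
    omega
  · push_neg at h
    have hla : 11 ≤ a.toList.length := by omega
    have hlb : 11 ≤ b.toList.length := by omega
    have hanch : (PySem.Str.slice b none (some 11)).toList = b.toList.take 11 := by
      simp only [PySem.Str.toList_slice, PySem.Chars.slice_eq_listSlice]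
      rw [PySem.List.slice_to _ (by norm_num)]
      rfl
    have hne : (PySem.Str.slice b none (some 11)).toList ≠ [] := by
      rw [hanch]
      intro hcon
      have h0 := congrArg List.length hcon
      rw [List.length_take] at h0
      simp only [List.length_nil] at h0
      omega
    have hmax : max ((a.toList.length : Int) - (b.toList.length : Int)) 0
        = ((a.toList.length - b.toList.length : Nat) : Int) := by
      rcases Nat.le_total b.toList.length a.toList.length with h' | h'
      · rw [max_eq_left (by omega)]; omega
      · rw [max_eq_right (by omega)]; omega
    rw [hmax, findLoopB_iff a b _ hne (a.toList.length + 1)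
          (a.toList.length - b.toList.length) (by omega) (by omega)]
    rw [← exists_anchor_iff a.toList b.toList hla hlb]
    constructor
    · rintro ⟨p, hp, h1, h2⟩
      rw [hanch] at h1
      exact ⟨p, hp, h1, h2⟩
    · rintro ⟨p, hp, h1, h2⟩
      rw [← hanch] at h1
      exact ⟨p, hp, h1, h2⟩

theorem check_eq_overlap_alt (a b : String) : check_overlap a b 10 = overlap_alt a b := by
  have hstep : check_overlap a b 10
      = ((PySem.Str.isIn a b || PySem.Str.isIn b a)
        || ((PySem.List.pyRange 1 (min (PySem.Str.len a) (PySem.Str.len b) + 1) 1).any (fun i =>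
              decide (i > 10) && (PySem.Str.slice a (some (-i)) none == PySem.Str.slice b none (some i))))
        || ((PySem.List.pyRange 1 (min (PySem.Str.len a) (PySem.Str.len b) + 1) 1).any (fun i =>
              decide (i > 10) && (PySem.Str.slice a none (some i) == PySem.Str.slice b (some (-i)) none)))) := by
    unfold check_overlap
    split_ifs with h1 h2 h3 <;> simp_all
  have hany2 : ((PySem.List.pyRange 1 (min (PySem.Str.len a) (PySem.Str.len b) + 1) 1).any (fun i =>
        decide (i > 10) && (PySem.Str.slice a none (some i) == PySem.Str.slice b (some (-i)) none))) = true
      ↔ OvL b.toList a.toList := by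
    have hfun : (fun i : Int =>
          decide (i > 10) && (PySem.Str.slice a none (some i) == PySem.Str.slice b (some (-i)) none))
        = (fun i : Int =>
          decide (i > 10) && (PySem.Str.slice b (some (-i)) none == PySem.Str.slice a none (some i))) := by
      funext i
      rw [str_beq_comm]
    rw [hfun, min_comm (PySem.Str.len a)]
    exact anyA_iff b a
  rw [hstep]
  unfold overlap_alt
  rw [← Bool.coe_iff_coe]
  simp only [Bool.or_eq_true, anyA_iff, hany2, tho_iff]

-- ----- de-duplication: Set.ofList of the per-index blocks is B's filtered index list -----

theorem foldl_add_cons_out (a : Int) (l : List Int) (h : ∀ x ∈ l, x ≠ a) :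
    ∀ s : List Int, l.foldl PySem.Set.add (a :: s) = a :: l.foldl PySem.Set.add s := by
  induction l with
  | nil => intro s; rfl
  | cons x xs ih =>
    intro s
    have hx : x ≠ a := h x (by simp)
    have hstep : PySem.Set.add (a :: s) x = a :: PySem.Set.add s x := by
      simp only [PySem.Set.add, PySem.Set.contains, List.contains_cons]
      have : (x == a) = false := by simp [hx]
      rw [this]
      simp only [Bool.false_or]
      split_ifs <;> simp
    simp only [List.foldl_cons, hstep]
    exact ih (fun y hy => h y (by simp [hy])) _

theorem foldl_add_const (a : Int) (w : List Int) (hall : ∀ v ∈ w, v = a) :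
    w.foldl PySem.Set.add [a] = [a] := by
  induction w with
  | nil => rfl
  | cons v vs ih =>
    have hv : v = a := hall v (by simp)
    have hstep : PySem.Set.add [a] v = [a] := by
      simp [PySem.Set.add, PySem.Set.contains, hv]
    simp only [List.foldl_cons, hstep]
    exact ih (fun y hy => hall y (by simp [hy]))

theorem ofList_flatMap_blocks (L : List (Int × String)) (f : Int × String → List Int)
    (hpw : L.Pairwise (fun x y => x.1 ≠ y.1))
    (hf : ∀ x ∈ L, ∀ v ∈ f x, v = x.1) :
    PySem.Set.ofList (L.flatMap f)
      = (L.filter (fun x => !(f x).isEmpty)).map (fun x => x.1) := by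
  induction L with
  | nil => rfl
  | cons x xs ih =>
    rw [List.pairwise_cons] at hpw
    have hrec := ih hpw.2 (fun y hy v hv => hf y (by simp [hy]) v hv)
    have hxout : ∀ v ∈ xs.flatMap f, v ≠ x.1 := by
      intro v hv
      rw [List.mem_flatMap] at hv
      obtain ⟨y, hy, hvy⟩ := hv
      rw [hf y (by simp [hy]) v hvy]
      exact fun hc => (hpw.1 y hy) hc.symm
    rw [List.flatMap_cons]
    rcases hw : f x with _ | ⟨v, vs⟩
    · simp only [List.nil_append]
      rw [hrec]
      simp [List.filter_cons, hw]
    · have hv : v = x.1 := hf x (by simp) v (by simp [hw])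
      have hvs : ∀ y ∈ vs, y = x.1 := fun y hy => hf x (by simp) y (by simp [hw, hy])
      rw [PySem.Set.ofList_eq_foldl, List.foldl_append]
      have h1 : List.foldl PySem.Set.add [] (v :: vs) = [x.1] := by
        have : PySem.Set.add [] v = [v] := by simp [PySem.Set.add, PySem.Set.contains]
        rw [List.foldl_cons, this, hv]
        exact foldl_add_const x.1 vs hvs
      rw [h1, foldl_add_cons_out x.1 (xs.flatMap f) hxout []]
      rw [← PySem.Set.ofList_eq_foldl, hrec]
      simp [List.filter_cons, hw]

theorem not_isEmpty_map_filter (c : Int) (p : String → Bool) (l : List String) :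
    (!(List.map (fun _ => c) (l.filter p)).isEmpty) = l.any p := by
  induction l with
  | nil => rfl
  | cons x xs ih =>
    rw [List.filter_cons]
    split_ifs with h
    · simp [List.any_cons, h]
    · rw [List.any_cons, ← ih]
      simp [h]

theorem get_gt_ids_eq (all_texts injected_adv : List String) :
    get_gt_ids all_texts injected_adv = get_gt_ids_alt all_texts injected_adv := by
  unfold get_gt_ids get_gt_ids_alt
  rw [PySem.List.foldl_congr_mem _ _
    (fun acc js => acc ++ (injected_adv.filter (fun m => check_overlap js.2 m 10)).map (fun _ => js.1)) _
    (by
      intro acc js _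
      exact PySem.List.foldl_append_if (fun m => check_overlap js.2 m 10) (fun _ => js.1) _ _)]
  rw [PySem.List.foldl_append_eq_flatMap, List.nil_append]
  rw [ofList_flatMap_blocks _ _
    ((PySem.List.pairwise_lt_enumerate all_texts 0).imp (fun h => ne_of_lt h))
    (by
      intro x _ v hv
      rw [List.mem_map] at hv
      obtain ⟨m, _, hm⟩ := hv
      exact hm.symm)]
  congr 1
  apply List.filter_congr
  intro js _
  rw [List.filter_congr (fun m _ => check_eq_overlap_alt js.2 m)]
  exact not_isEmpty_map_filter js.1 (fun m => overlap_alt js.2 m) injected_adv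

-- ===== VERDICT (by name: the statement is the Claim_ definition above) =====
theorem get_gt_ids_spec : Claim_equal_get_gt_ids := by
  intro all_texts injected_adv _
  unfold Spec_get_gt_ids
  exact get_gt_ids_eq all_texts injected_adv
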